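-- pv_equiv track=rewrite | github.com/erichaase/topcoder-python | topcoder/match_counts.py | solve
-- ===== SOURCE A (Python) =====
-- def solve (i, people, tasks):
--     if i >= len(people):
--         return [tasks]
--
--     l = []
--     for ability in people[i]:
--         ability = int(ability)
--         if tasks[ability] == "N":
--             tasks_assigned = tasks[:ability] + str(i) + tasks[ability + 1:]
--             l += solve(i + 1, people, tasks_assigned)
--     return l
-- ===== SOURCE B (Python) =====
-- def solve(i, people, tasks):
--     # Iterative worklist: one list comprehension per person extends every
--     # partial assignment, replacing A's depth-first recursion.
--     partials = [tasks]
--     j = i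
--     while j < len(people):
--         partials = [p[:k] + str(j) + p[k + 1:]
--                     for p in partials
--                     for k in map(int, people[j])
--                     if p[k] == 'N']
--         j += 1
--     return partials
-- ===== Notes on version B (the rewrite author's own statement) =====
-- stated objective: alternative
-- what changed: Replaces A's depth-first recursion over persons with an iterative while-loop worklist: each pass expands every partial assignment string by one person via a list comprehension over map(int, people[j]), producing the same strings in the same order.
-- outside the precondition, e.g. on solve(0, [['0'], ['5']], 'Y'): A returns [], B returns []; on solve(0, [['-1']], 'YN'): A returns ['Y0YN'], B returns ['Y0YN']
import Mathlib
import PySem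

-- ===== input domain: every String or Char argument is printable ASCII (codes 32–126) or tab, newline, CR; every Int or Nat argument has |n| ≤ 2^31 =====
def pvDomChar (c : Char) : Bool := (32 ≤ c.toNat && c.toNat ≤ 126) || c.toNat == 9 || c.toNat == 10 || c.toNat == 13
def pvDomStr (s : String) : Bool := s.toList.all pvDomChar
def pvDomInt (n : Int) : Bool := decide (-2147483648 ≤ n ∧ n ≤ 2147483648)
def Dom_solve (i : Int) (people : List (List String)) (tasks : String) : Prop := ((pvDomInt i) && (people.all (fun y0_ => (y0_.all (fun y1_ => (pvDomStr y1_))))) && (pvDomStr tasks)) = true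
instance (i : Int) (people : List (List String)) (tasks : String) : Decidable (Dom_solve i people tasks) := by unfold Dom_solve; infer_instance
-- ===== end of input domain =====

-- B replaces A's depth-first recursion with an iterative while-loop worklist: one
-- comprehension per person extends all partial assignments; objective: alternative decomposition.

-- ===== PORT A =====
-- literal port of A's DFS recursion: base case i >= len(people), else fold over people[i],
-- int(ability) / tasks[ability] / slicing via PySem (a raising construct is skipped; Pre_ excludes it)
def solve (i : Int) (people : List (List String)) (tasks : String) : List String :=
  if _h : (people.length : Int) ≤ i then [tasks]
  else
    ((PySem.List.pyGet? people i).getD []).foldl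
      (fun l a =>
        match PySem.Int.ofStr? a with
        | none => l               -- int(ability) raises ValueError: outside Pre_
        | some ability =>
          match PySem.Str.pyGet? tasks ability with
          | none => l             -- tasks[ability] raises IndexError: outside Pre_
          | some c =>
            if c = 'N' then
              l ++ solve (i + 1) people
                (PySem.Str.slice tasks none (some ability) ++ PySem.Int.toStr i ++
                 PySem.Str.slice tasks (some (ability + 1)) none)
            else l)
      []
termination_by ((people.length : Int) - i).toNat
decreasing_by omega

-- ===== PORT B =====
-- the body of Source B's while loop: one comprehension step over the current partials
-- (`for p in partials for k in map(int, people[j]) if p[k] == 'N'` → flatMap / filterMap;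
-- a raising int(a) or p[k] yields none: outside Pre_)
def solveAltStep (people : List (List String)) (j : Int) (partials : List String) : List String :=
  partials.flatMap (fun p =>
    ((PySem.List.pyGet? people j).getD []).filterMap (fun a =>
      (PySem.Int.ofStr? a).bind (fun k =>
        match PySem.Str.pyGet? p k with
        | some c =>
          if c = 'N' then
            some (PySem.Str.slice p none (some k) ++ PySem.Int.toStr j ++
                  PySem.Str.slice p (some (k + 1)) none)
          else none
        | none => none)))

-- Source B's `while j < len(people)` loop, as a tail recursion on the counter j
def solveAltLoop (people : List (List String)) (j : Int) (partials : List String) : List String :=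
  if _h : j < (people.length : Int) then
    solveAltLoop people (j + 1) (solveAltStep people j partials)
  else partials
termination_by ((people.length : Int) - j).toNat
decreasing_by omega

def solve_alt (i : Int) (people : List (List String)) (tasks : String) : List String :=
  solveAltLoop people i [tasks]

-- ===== PRECONDITION & SPEC =====
-- Pre_ excludes exactly the inputs where the Python can raise (a people index below -len(people),
-- an ability string int() rejects, or an ability outside 0..len(tasks)-1); for abilities this is
-- checked up front, so it also excludes some inputs where A still returns: negative in-range
-- abilities (Python's wraparound, a corner nobody specifies) and invalid abilities of people
-- the search never reaches — on the cited such inputs A and B agree anyway.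
def Pre_solve (i : Int) (people : List (List String)) (tasks : String) : Prop :=
  ((!decide (i < (people.length : Int)) || decide (-(people.length : Int) ≤ i)) &&
   (PySem.List.pyRange i people.length 1).all (fun j =>
     ((PySem.List.pyGet? people j).getD []).all (fun a =>
       match PySem.Int.ofStr? a with
       | none => false
       | some k => decide (0 ≤ k) && decide (k < PySem.Str.len tasks)))) = true
instance (i : Int) (people : List (List String)) (tasks : String) : Decidable (Pre_solve i people tasks) := by
  unfold Pre_solve; infer_instance

def pvWitness_solve : Int × List (List String) × String := (0, [["0"], ["1"]], "NN")

def Spec_solve (i : Int) (people : List (List String)) (tasks : String) (out : List String) : Prop := out = solve_alt i people tasks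
instance (i : Int) (people : List (List String)) (tasks : String) (out : List String) : Decidable (Spec_solve i people tasks out) := by unfold Spec_solve; infer_instance

-- ===== CLAIM (what is proved, stated in full; the proofs are below) =====
def Claim_equal_solve : Prop := ∀ (i : Int) (people : List (List String)) (tasks : String), Dom_solve i people tasks → Pre_solve i people tasks → Spec_solve i people tasks (solve i people tasks)

-- ===== LEMMAS AND PROOFS =====

lemma flatMap_assoc' {α β γ : Type} (l : List α) (f : α → List β) (g : β → List γ) :
    (l.flatMap f).flatMap g = l.flatMap (fun x => (f x).flatMap g) := by
  induction l with
  | nil => simp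
  | cons a l ih => simp [ih]

lemma filterMap_flatMap' {α β γ : Type} (l : List α) (f : α → Option β) (g : β → List γ) :
    (l.filterMap f).flatMap g = l.flatMap (fun a => ((f a).map g).getD []) := by
  induction l with
  | nil => simp
  | cons a l ih => rcases h : f a with _ | b <;> simp [h, ih]

lemma solve_base {i : Int} (people : List (List String)) (tasks : String)
    (h : (people.length : Int) ≤ i) : solve i people tasks = [tasks] := by
  rw [solve, dif_pos h]

lemma solve_step {i : Int} (people : List (List String)) (tasks : String)
    (h : ¬ (people.length : Int) ≤ i) :
    solve i people tasks
      = (solveAltStep people i [tasks] ).flatMap (fun t => solve (i + 1) people t) := by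
  rw [solve, dif_neg h]
  unfold solveAltStep
  rw [show (fun (l : List String) a =>
        match PySem.Int.ofStr? a with
        | none => l
        | some ability =>
          match PySem.Str.pyGet? tasks ability with
          | none => l
          | some c =>
            if c = 'N' then
              l ++ solve (i + 1) people
                (PySem.Str.slice tasks none (some ability) ++ PySem.Int.toStr i ++
                 PySem.Str.slice tasks (some (ability + 1)) none)
            else l) =
      (fun (l : List String) a => l ++
        (match PySem.Int.ofStr? a with
        | none => []
        | some ability =>
          match PySem.Str.pyGet? tasks ability with
          | none => []
          | some c =>
            if c = 'N' then
              solve (i + 1) people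
                (PySem.Str.slice tasks none (some ability) ++ PySem.Int.toStr i ++
                 PySem.Str.slice tasks (some (ability + 1)) none)
            else [])) from ?_]
  · rw [PySem.List.foldl_append_eq_flatMap]
    simp only [List.flatMap_cons, List.flatMap_nil, List.append_nil, List.nil_append]
    rw [filterMap_flatMap']
    congr 1
    funext a
    rcases hA : PySem.Int.ofStr? a with _ | ab
    · simp
    · rcases hC : PySem.List.pyGet? tasks.toList ab with _ | c
      · simp [PySem.Str.pyGet?, hC, Option.bind]
      · by_cases hc : c = 'N' <;> simp [PySem.Str.pyGet?, hC, hc, Option.bind]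
  · funext l a
    rcases hA : PySem.Int.ofStr? a with _ | ab
    · simp
    · rcases hC : PySem.List.pyGet? tasks.toList ab with _ | c
      · simp [PySem.Str.pyGet?, hC]
      · by_cases hc : c = 'N' <;> simp [PySem.Str.pyGet?, hC, hc]

lemma step_flatMap (people : List (List String)) (j : Int) (P : List String) :
    solveAltStep people j P = P.flatMap (fun t => solveAltStep people j [t]) := by
  unfold solveAltStep
  simp

lemma loop_eq (people : List (List String)) :
    ∀ (n : Nat) (j : Int) (P : List String), (people.length : Int) ≤ j + n →
      solveAltLoop people j P = P.flatMap (fun t => solve j people t) := by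
  intro n
  induction n with
  | zero =>
    intro j P h
    rw [solveAltLoop, dif_neg (by omega : ¬ j < (people.length : Int))]
    have : ∀ t, solve j people t = [t] := fun t => solve_base people t (by omega)
    simp [this]
  | succ n ih =>
    intro j P h
    by_cases hlt : j < (people.length : Int)
    · rw [solveAltLoop, dif_pos hlt]
      rw [ih (j + 1) _ (by omega)]
      rw [step_flatMap, flatMap_assoc']
      congr 1
      funext t
      exact (solve_step people t (by omega)).symm
    · rw [solveAltLoop, dif_neg hlt]
      have : ∀ t, solve j people t = [t] := fun t => solve_base people t (by omega)
      simp [this]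

lemma solve_alt_eq_solve (i : Int) (people : List (List String)) (tasks : String) :
    solve_alt i people tasks = solve i people tasks := by
  unfold solve_alt
  rw [loop_eq people ((people.length : Int) - i).toNat i [tasks] (by omega)]
  simp

-- ===== VERDICT (by name: the statement is the Claim_ definition above) =====
theorem solve_spec : Claim_equal_solve := by
  intro i people tasks _ _
  unfold Spec_solve
  exact (solve_alt_eq_solve i people tasks).symm
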